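-- pv_equiv track=rewrite | github.com/EMBEDDIA/eunlg-with-neural-ordering | experiments/src/data/statfi.py | collect_pars_into_articles
-- ===== SOURCE A (Python) =====
-- def collect_pars_into_articles(pars):
--
--     arts = []
--     prev_art = []
--     for par in pars:
--         if par not in ['[EOF]', '[eof]']:
--             prev_art += [par]
--         else:
--             arts += [prev_art]
--             prev_art = []
--     if prev_art:
--         arts += [prev_art]
--
--     return arts
-- ===== SOURCE B (Python) =====
-- def collect_pars_into_articles(pars):
--     pars = list(pars)
--     bnd = [i for i, p in enumerate(pars) if p in ('[EOF]', '[eof]')]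
--     arts = []
--     start = 0
--     for b in bnd:
--         arts.append(pars[start:b])
--         start = b + 1
--     if start < len(pars):
--         arts.append(pars[start:])
--     return arts
-- ===== Notes on version B (the rewrite author's own statement) =====
-- stated objective: alternative
-- what changed: B materializes the input once, collects the EOF boundary indices with one enumerate-comprehension, and builds the articles by slicing the list between consecutive boundaries, instead of A's single-pass accumulation of a growing current article.
import Mathlib
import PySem

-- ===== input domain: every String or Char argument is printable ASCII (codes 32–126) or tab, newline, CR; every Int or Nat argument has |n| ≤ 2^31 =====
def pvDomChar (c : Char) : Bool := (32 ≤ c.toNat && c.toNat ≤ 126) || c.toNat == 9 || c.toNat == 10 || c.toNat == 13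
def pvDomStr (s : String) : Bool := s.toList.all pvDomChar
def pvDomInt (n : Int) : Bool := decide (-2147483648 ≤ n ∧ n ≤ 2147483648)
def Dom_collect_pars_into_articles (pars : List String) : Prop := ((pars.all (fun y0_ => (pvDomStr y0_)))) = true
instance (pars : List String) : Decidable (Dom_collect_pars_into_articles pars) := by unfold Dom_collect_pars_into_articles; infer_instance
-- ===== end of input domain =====

-- B builds the articles by slicing between precomputed EOF boundary indices instead of A's
-- single-pass accumulation; same values everywhere (proved below). A is total, so no Pre_.

-- ===== PORT A =====
def collect_pars_into_articles (pars : List String) : List (List String) :=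
  let st := pars.foldl
    (fun (st : List (List String) × List String) par =>
      if par ∉ (["[EOF]", "[eof]"] : List String) then (st.1, st.2 ++ [par])
      else (st.1 ++ [st.2], []))
    ([], [])
  if st.2 ≠ [] then st.1 ++ [st.2] else st.1

-- ===== PORT B =====
def collect_pars_into_articles_alt (pars : List String) : List (List String) :=
  let bnd := ((PySem.List.enumerate pars 0).filter
      (fun ip => decide (ip.2 ∈ (["[EOF]", "[eof]"] : List String)))).map (·.1)
  let st := bnd.foldl
    (fun (st : List (List String) × Int) b =>
      (st.1 ++ [PySem.List.slice pars (some st.2) (some b)], b + 1))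
    ([], 0)
  if st.2 < (pars.length : Int) then st.1 ++ [PySem.List.slice pars (some st.2) none] else st.1

-- ===== PRECONDITION & SPEC =====
def Spec_collect_pars_into_articles (pars : List String) (out : List (List String)) : Prop := out = collect_pars_into_articles_alt pars
instance (pars : List String) (out : List (List String)) : Decidable (Spec_collect_pars_into_articles pars out) := by unfold Spec_collect_pars_into_articles; infer_instance

-- ===== CLAIM (what is proved, stated in full; the proofs are below) =====
def Claim_equal_collect_pars_into_articles : Prop := ∀ (pars : List String), Dom_collect_pars_into_articles pars → Spec_collect_pars_into_articles pars (collect_pars_into_articles pars)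

-- ===== LEMMAS AND PROOFS =====

-- Common characterisation: completed articles and the trailing (possibly dropped) article.
def splitE : List String → List (List String) × List String
  | [] => ([], [])
  | p :: rest =>
    let r := splitE rest
    if p ∈ (["[EOF]", "[eof]"] : List String) then ([] :: r.1, r.2)
    else
      match r.1 with
      | [] => ([], p :: r.2)
      | d :: ds' => ((p :: d) :: ds', r.2)

def tailPart (t : List String) : List (List String) := if t ≠ [] then [t] else []

lemma A_fold (pars : List String) : ∀ (arts : List (List String)) (prev : List String),
    pars.foldl
      (fun (st : List (List String) × List String) par =>
        if par ∉ (["[EOF]", "[eof]"] : List String) then (st.1, st.2 ++ [par])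
        else (st.1 ++ [st.2], []))
      (arts, prev)
    = match (splitE pars).1 with
      | [] => (arts, prev ++ (splitE pars).2)
      | d :: ds' => (arts ++ (prev ++ d) :: ds', (splitE pars).2) := by
  induction pars with
  | nil => intro arts prev; simp [splitE]
  | cons p rest ih =>
    intro arts prev
    by_cases hp : p ∈ (["[EOF]", "[eof]"] : List String)
    · simp only [List.foldl_cons, if_neg (not_not_intro hp), splitE]
      rw [ih]
      rcases h : (splitE rest).1 with _ | ⟨d, ds'⟩ <;> simp [hp]
    · simp only [List.foldl_cons, if_pos hp, splitE]
      rw [ih]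
      rcases h : (splitE rest).1 with _ | ⟨d, ds'⟩ <;> simp [hp]

def bndF (suf : List String) (s : Int) : List Int :=
  ((PySem.List.enumerate suf s).filter
      (fun ip => decide (ip.2 ∈ (["[EOF]", "[eof]"] : List String)))).map (·.1)

def stepB (full : List String) (st : List (List String) × Int) (b : Int) :
    List (List String) × Int :=
  (st.1 ++ [PySem.List.slice full (some st.2) (some b)], b + 1)

def finB (full : List String) (st : List (List String) × Int) : List (List String) :=
  if st.2 < (full.length : Int) then st.1 ++ [PySem.List.slice full (some st.2) none] else st.1

lemma B_fold (suf : List String) : ∀ (pre : List String) (arts : List (List String)) (start : Nat),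
    start ≤ pre.length →
    finB (pre ++ suf)
      ((bndF suf (pre.length : Int)).foldl (stepB (pre ++ suf)) (arts, (start : Int)))
    = match (splitE suf).1 with
      | [] => arts ++ tailPart (pre.drop start ++ (splitE suf).2)
      | d :: ds' => arts ++ ((pre.drop start ++ d) :: ds') ++ tailPart (splitE suf).2 := by
  induction suf with
  | nil =>
    intro pre arts start hst
    have hdrop : PySem.List.slice pre (some (start : Int)) none = pre.drop start := by
      exact PySem.List.slice_from_natCast pre start
    simp only [List.append_nil, bndF, PySem.List.enumerate_nil, List.filter_nil, List.map_nil,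
      List.foldl_nil, splitE, finB, tailPart, hdrop]
    by_cases h : start < pre.length
    · rw [if_pos (by exact_mod_cast h), if_pos (by simp [List.drop_eq_nil_iff]; omega)]
    · rw [if_neg (by omega), if_neg (by simp [List.drop_eq_nil_iff]; omega)]
      simp
  | cons p rest ih =>
    intro pre arts start hst
    have hfull : pre ++ p :: rest = (pre ++ [p]) ++ rest := by simp
    have hlen : (pre.length : Int) + 1 = (((pre ++ [p]).length : Nat) : Int) := by simp
    by_cases hp : p ∈ (["[EOF]", "[eof]"] : List String)
    · -- boundary: emit pars[start:len pre], new start = len pre + 1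
      have hp' : p = "[EOF]" ∨ p = "[eof]" := by simpa using hp
      have hb : bndF (p :: rest) (pre.length : Int)
          = (pre.length : Int) :: bndF rest ((pre.length : Int) + 1) := by
        rcases hp' with h | h <;> simp [bndF, PySem.List.enumerate_cons, h]
      have hslice : PySem.List.slice (pre ++ p :: rest) (some (start : Int))
          (some ((pre.length : Nat) : Int)) = pre.drop start := by
        rw [PySem.List.slice_natCast]
        rw [List.drop_append_of_le_length hst]
        exact List.take_left' (by simp [List.length_drop])
      rw [hb]
      simp only [List.foldl_cons, stepB, hslice]
      rw [hlen, hfull]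
      rw [ih (pre ++ [p]) (arts ++ [pre.drop start]) (pre ++ [p]).length (le_refl _)]
      have hdp : (pre ++ [p]).drop (pre ++ [p]).length = [] := by simp
      rcases h : (splitE rest).1 with _ | ⟨d, ds'⟩ <;>
        rcases hp' with he | he <;>
        simp [splitE, h, he]
    · -- not a boundary
      have hp' : p ≠ "[EOF]" ∧ p ≠ "[eof]" := by simpa using hp
      have hb : bndF (p :: rest) (pre.length : Int) = bndF rest ((pre.length : Int) + 1) := by
        simp [bndF, PySem.List.enumerate_cons, hp'.1, hp'.2]
      rw [hb, hfull, hlen]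
      rw [ih (pre ++ [p]) arts start (by simp; omega)]
      have hdp : (pre ++ [p]).drop start = pre.drop start ++ [p] :=
        List.drop_append_of_le_length hst
      rcases h : (splitE rest).1 with _ | ⟨d, ds'⟩ <;>
        simp [splitE, h, hp'.1, hp'.2, hdp]

lemma splitE_fst_nil (pars : List String) (h : (splitE pars).1 = []) :
    (splitE pars).2 = pars := by
  induction pars with
  | nil => simp [splitE]
  | cons p rest ih =>
    by_cases hp : p ∈ (["[EOF]", "[eof]"] : List String)
    · simp [splitE, hp] at h
    · rcases hr : (splitE rest).1 with _ | ⟨d, ds'⟩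
      · simp [splitE, hp, hr, ih hr]
      · simp [splitE, hp, hr] at h

-- ===== VERDICT (by name: the statement is the Claim_ definition above) =====
theorem collect_pars_into_articles_spec : Claim_equal_collect_pars_into_articles := by
  intro pars _
  unfold Spec_collect_pars_into_articles collect_pars_into_articles collect_pars_into_articles_alt
  have hA := A_fold pars [] []
  have hB := B_fold pars [] [] 0 (by simp)
  simp only [List.nil_append, List.drop_nil] at hA hB
  rw [hA]
  have hB' : (if ((bndF pars 0).foldl (stepB pars) ([], (0:Int))).2 < (pars.length : Int) then
        ((bndF pars 0).foldl (stepB pars) ([], (0:Int))).1 ++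
          [PySem.List.slice pars (some ((bndF pars 0).foldl (stepB pars) ([], (0:Int))).2) none]
      else ((bndF pars 0).foldl (stepB pars) ([], (0:Int))).1)
      = match (splitE pars).1 with
        | [] => tailPart (splitE pars).2
        | d :: ds' => (d :: ds') ++ tailPart (splitE pars).2 := by
    have := hB
    simpa [finB, splitE, tailPart] using this
  rcases h : (splitE pars).1 with _ | ⟨d, ds'⟩
  · have h2 := splitE_fst_nil pars h
    simp only [h] at hB' ⊢
    rw [show (fun (st : List (List String) × Int) (b : Int) =>
        (st.1 ++ [PySem.List.slice pars (some st.2) (some b)], b + 1)) = stepB pars from rfl] at *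
    rw [show ((PySem.List.enumerate pars 0).filter
        (fun ip => decide (ip.2 ∈ (["[EOF]", "[eof]"] : List String)))).map (·.1)
        = bndF pars 0 from rfl]
    rw [hB']
    simp [tailPart, h2]
  · simp only [h] at hB' ⊢
    rw [show (fun (st : List (List String) × Int) (b : Int) =>
        (st.1 ++ [PySem.List.slice pars (some st.2) (some b)], b + 1)) = stepB pars from rfl] at *
    rw [show ((PySem.List.enumerate pars 0).filter
        (fun ip => decide (ip.2 ∈ (["[EOF]", "[eof]"] : List String)))).map (·.1)
        = bndF pars 0 from rfl]
    rw [hB']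
    simp [tailPart]
    split <;> simp
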